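-- pv_equiv track=rewrite | github.com/alexDavis28/NeaProject | app/models.py | calculate_password_hash
-- ===== SOURCE A (Python) =====
-- def calculate_password_hash(password: str = None) -> str:
--     total = 0
--     for i, character in enumerate(password):
--         total += ord(character) ** (i + 1)
--     product = 1
--     for character in password:
--         product *= ord(character)
--     value = total * product
--     hash = str(value % 2147483647)
--     return hash
-- ===== SOURCE B (Python) =====
-- def calculate_password_hash(password: str = None) -> str:
--     P = 2147483647
--     total = 0
--     product = 1
--     for i, character in enumerate(password):
--         o = ord(character)
--         total = (total + pow(o, i + 1, P)) % P
--         product = product * o % P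
--     return str(total * product % P)
-- ===== Notes on version B (the rewrite author's own statement) =====
-- stated objective: faster
-- what changed: Single pass with modular exponentiation (pow with modulus) and modular products keeps every intermediate value below 2^31, instead of two passes building huge bigints (total of positional powers, product of all codes) and reducing mod 2147483647 only at the end.
import Mathlib
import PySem

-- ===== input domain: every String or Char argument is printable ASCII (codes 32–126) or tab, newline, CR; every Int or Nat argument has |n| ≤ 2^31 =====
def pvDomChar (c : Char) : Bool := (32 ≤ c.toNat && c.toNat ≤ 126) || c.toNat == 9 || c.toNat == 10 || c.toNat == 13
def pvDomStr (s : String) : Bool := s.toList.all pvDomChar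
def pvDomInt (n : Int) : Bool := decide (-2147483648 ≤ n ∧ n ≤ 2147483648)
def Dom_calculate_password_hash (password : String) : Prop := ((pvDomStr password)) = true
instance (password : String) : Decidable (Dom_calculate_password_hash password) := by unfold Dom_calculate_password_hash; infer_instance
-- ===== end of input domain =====

-- B replaces A's two bigint passes by one pass of modular arithmetic (pow with modulus),
-- keeping every intermediate bounded: measurably faster, same result.


-- ===== PORT A =====
def calculate_password_hash (password : String) : String :=
  let total : Int := (PySem.List.enumerate password.toList 0).foldl
    (fun t p => t + ((p.2.toNat : Int)) ^ ((p.1 + 1).toNat)) 0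
  let product : Int := password.toList.foldl (fun pr c => pr * ((c.toNat : Int))) 1
  let value := total * product
  PySem.Int.toStr (PySem.Int.mod value 2147483647)

-- ===== PORT B =====
def calculate_password_hash_alt (password : String) : String :=
  let s := (PySem.List.enumerate password.toList 0).foldl
    (fun (s : Int × Int) p =>
      let o : Int := p.2.toNat
      (PySem.Int.mod (s.1 + PySem.Int.powMod o ((p.1 + 1).toNat) 2147483647) 2147483647,
       PySem.Int.mod (s.2 * o) 2147483647))
    (0, 1)
  PySem.Int.toStr (PySem.Int.mod (s.1 * s.2) 2147483647)

-- ===== PRECONDITION & SPEC =====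
def Spec_calculate_password_hash (password : String) (out : String) : Prop := out = calculate_password_hash_alt password
instance (password : String) (out : String) : Decidable (Spec_calculate_password_hash password out) := by unfold Spec_calculate_password_hash; infer_instance

-- ===== CLAIM (what is proved, stated in full; the proofs are below) =====
def Claim_equal_calculate_password_hash : Prop := ∀ (password : String), Dom_calculate_password_hash password → Spec_calculate_password_hash password (calculate_password_hash password)

-- ===== LEMMAS AND PROOFS =====

-- Loop invariant: B's single modular pass tracks A's two accumulators modulo 2147483647.
theorem pv_loop (l : List (Int × Char)) : ∀ (t pr : Int),
    l.foldl
      (fun (s : Int × Int) p =>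
        let o : Int := p.2.toNat
        (PySem.Int.mod (s.1 + PySem.Int.powMod o ((p.1 + 1).toNat) 2147483647) 2147483647,
         PySem.Int.mod (s.2 * o) 2147483647))
      (t % 2147483647, pr % 2147483647)
    = ((l.foldl (fun t p => t + ((p.2.toNat : Int)) ^ ((p.1 + 1).toNat)) t) % 2147483647,
       (l.foldl (fun pr p => pr * ((p.2.toNat : Int))) pr) % 2147483647) := by
  induction l with
  | nil => intro t pr; rfl
  | cons p l ih =>
    intro t pr
    simp only [List.foldl_cons]
    have hmod : ∀ a : Int, PySem.Int.mod a 2147483647 = a % 2147483647 := fun a =>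
      PySem.Int.mod_eq_emod_of_pos (by norm_num)
    have h1 : PySem.Int.mod (t % 2147483647 +
        PySem.Int.powMod (p.2.toNat : Int) ((p.1 + 1).toNat) 2147483647) 2147483647
        = (t + ((p.2.toNat : Int)) ^ ((p.1 + 1).toNat)) % 2147483647 := by
      simp only [PySem.Int.powMod, hmod]
      rw [Int.add_emod, Int.emod_emod_of_dvd _ dvd_rfl, Int.emod_emod_of_dvd _ dvd_rfl,
        ← Int.add_emod]
    have h2 : PySem.Int.mod (pr % 2147483647 * (p.2.toNat : Int)) 2147483647
        = (pr * (p.2.toNat : Int)) % 2147483647 := by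
      rw [hmod, Int.mul_emod, Int.emod_emod_of_dvd _ dvd_rfl, ← Int.mul_emod]
    rw [h1, h2]
    exact ih _ _

-- ===== VERDICT (by name: the statement is the Claim_ definition above) =====
theorem calculate_password_hash_spec : Claim_equal_calculate_password_hash := by
  intro password _
  unfold Spec_calculate_password_hash calculate_password_hash calculate_password_hash_alt
  simp only []
  have h0 : ((0 : Int), (1 : Int)) = ((0 : Int) % 2147483647, (1 : Int) % 2147483647) := by decide
  rw [h0, pv_loop]
  have hprod : password.toList.foldl (fun pr c => pr * ((c.toNat : Int))) 1
      = (PySem.List.enumerate password.toList 0).foldl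
          (fun pr p => pr * ((p.2.toNat : Int))) 1 := by
    conv_lhs => rw [← PySem.List.map_snd_enumerate password.toList 0]
    rw [List.foldl_map]
  rw [hprod]
  dsimp only
  rw [PySem.Int.mod_eq_emod_of_pos (by norm_num),
      PySem.Int.mod_eq_emod_of_pos (by norm_num), Int.mul_emod]
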